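-- pv_equiv track=rewrite | github.com/Managire/Planetka | operators.py | _next_saved_location_name
-- ===== SOURCE A (Python) =====
-- def _next_saved_location_name(locations):
--     used = {str(loc.get("name", "")).strip() for loc in (locations or ()) if isinstance(loc, dict)}
--     index = 1
--     while True:
--         candidate = f"Location {index}"
--         if candidate not in used:
--             return candidate
--         index += 1
-- ===== SOURCE B (Python) =====
-- def _next_saved_location_name(locations):
--     # Parse each name into its "Location N" integer index (canonical positive
--     # decimal only), then sort the collected indices and scan once for the
--     # first gap starting from 1 (sort-then-scan instead of generate-and-test).
--     idxs = []
--     for loc in (locations or ()):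
--         if not isinstance(loc, dict):
--             continue
--         name = str(loc.get("name", "")).strip()
--         if not name.startswith("Location "):
--             continue
--         rest = name[9:]
--         if not rest or rest[0] == "0":
--             continue
--         n = 0
--         for ch in rest:
--             if not ("0" <= ch <= "9"):
--                 n = None
--                 break
--             n = n * 10 + (ord(ch) - 48)
--         if n is not None:
--             idxs.append(n)
--     i = 1
--     for v in sorted(idxs):
--         if v == i:
--             i += 1
--         elif v > i:
--             break
--     return "Location %d" % i
-- ===== Notes on version B (the rewrite author's own statement) =====
-- stated objective: alternative
-- what changed: A generates candidate strings 'Location 1', 'Location 2', ... and tests each against the set of name strings; B parses each name once into its 'Location N' integer index (canonical positive decimal only), sorts the collected indices and finds the first gap in one scan over the sorted list, with no candidate generation and no membership probing.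
import Mathlib
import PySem

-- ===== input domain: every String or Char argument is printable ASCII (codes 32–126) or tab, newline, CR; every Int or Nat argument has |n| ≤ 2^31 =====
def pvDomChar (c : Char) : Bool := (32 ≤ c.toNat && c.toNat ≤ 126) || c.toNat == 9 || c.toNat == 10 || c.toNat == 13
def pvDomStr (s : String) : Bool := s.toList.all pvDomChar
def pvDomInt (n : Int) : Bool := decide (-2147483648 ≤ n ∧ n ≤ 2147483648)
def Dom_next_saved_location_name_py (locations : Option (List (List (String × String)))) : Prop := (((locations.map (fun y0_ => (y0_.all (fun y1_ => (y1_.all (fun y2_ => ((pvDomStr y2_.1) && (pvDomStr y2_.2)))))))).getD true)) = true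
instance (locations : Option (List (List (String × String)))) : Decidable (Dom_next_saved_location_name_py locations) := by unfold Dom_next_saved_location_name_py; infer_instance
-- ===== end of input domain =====

-- B replaces A's generate-and-test probing over the set of name strings by parsing each
-- name into its "Location N" index, sorting the indices and finding the first gap in one
-- scan over the sorted list (objective: alternative — a different algorithm of similar cost).

-- ===== PORT A =====
-- str(loc.get("name", "")).strip()  (str() is the identity on the String values of this type)
def pvNameA (loc : List (String × String)) : String :=
  PySem.Str.strip ((List.lookup "name" loc).getD "")

-- the 'while True' loop of A; the fuel |locs|+1 provably suffices: the loop returns at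
-- latest at index |used|+1 ≤ |locs|+1, so the fuel-exhausted base case is never the
-- first unused index being skipped (it returns the then-current candidate unchecked)
def pvLoopA (used : List String) : Nat → Int → String
  | 0, index => "Location " ++ PySem.Int.toStr index
  | fuel+1, index =>
    let candidate := "Location " ++ PySem.Int.toStr index
    if used.contains candidate = false then candidate else pvLoopA used fuel (index + 1)

def next_saved_location_name_py (locations : Option (List (List (String × String)))) : String :=
  let locs := locations.getD []
  let used : PySem.Set String := PySem.Set.ofList (locs.map (fun loc => pvNameA loc))
  pvLoopA used (locs.length + 1) 1

-- ===== PORT B =====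
-- B reads each dict's stripped name exactly as A does (pvNameA is that shared accessor)
-- the inner 'for ch in rest' digit-accumulator loop of B (n = n*10 + (ord(ch) - 48))
def pvScanB : List Char → Int → Option Int
  | [], n => some n
  | c :: cs, n =>
    if '0' ≤ c ∧ c ≤ '9' then pvScanB cs (n * 10 + ((c.toNat : Int) - 48)) else none

-- name.startswith("Location "); rest = name[9:]; reject empty rest and a leading '0'
-- "if not rest or rest[0] == '0': continue" and the digit loop, on the suffix
def pvRestB (rest : List Char) : Option Int :=
  if rest.isEmpty then none
  else if rest.head? = some '0' then none
  else pvScanB rest 0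

def pvParseB (name : String) : Option Int :=
  if PySem.Str.startswith name "Location " then
    pvRestB (PySem.Str.slice name (some 9) none).toList
  else none

-- the 'for v in sorted(idxs)' gap scan of B (break → return the current i)
def pvGapScan : List Int → Int → Int
  | [], i => i
  | v :: vs, i => if v = i then pvGapScan vs (i + 1) else if v > i then i else pvGapScan vs i

def next_saved_location_name_py_alt (locations : Option (List (List (String × String)))) : String :=
  let locs := locations.getD []
  let idxs : List Int :=
    locs.foldl (fun acc loc =>
      match pvParseB (pvNameA loc) with
      | some n => acc ++ [n]
      | none => acc) []
  "Location " ++ PySem.Int.toStr (pvGapScan (PySem.List.sorted idxs (fun x => x) false) 1)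

-- ===== PRECONDITION & SPEC =====
def Spec_next_saved_location_name_py (locations : Option (List (List (String × String)))) (out : String) : Prop := out = next_saved_location_name_py_alt locations
instance (locations : Option (List (List (String × String)))) (out : String) : Decidable (Spec_next_saved_location_name_py locations out) := by unfold Spec_next_saved_location_name_py; infer_instance

-- ===== CLAIM (what is proved, stated in full; the proofs are below) =====
def Claim_equal_next_saved_location_name_py : Prop := ∀ (locations : Option (List (List (String × String)))), Dom_next_saved_location_name_py locations → Spec_next_saved_location_name_py locations (next_saved_location_name_py locations)

-- ===== LEMMAS AND PROOFS =====

lemma tdc_step (b fuel n : Nat) (ds : List Char) :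
    Nat.toDigitsCore b (fuel+1) n ds =
      if n / b = 0 then (n % b).digitChar :: ds
      else Nat.toDigitsCore b fuel (n / b) ((n % b).digitChar :: ds) := by
  rw [Nat.toDigitsCore]

lemma tdc_tl (fuel : Nat) : ∀ (n : Nat) (tl : List Char),
    Nat.toDigitsCore 10 fuel n tl = Nat.toDigitsCore 10 fuel n [] ++ tl := by
  induction fuel with
  | zero => intro n tl; rw [Nat.toDigitsCore, Nat.toDigitsCore]; simp
  | succ f ih =>
    intro n tl
    rw [tdc_step, tdc_step]
    by_cases h : n / 10 = 0
    · simp [h]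
    · simp only [h, if_false]
      rw [ih (n/10) ((n % 10).digitChar :: tl), ih (n/10) [(n % 10).digitChar]]
      simp

lemma tdc_fuel (f1 : Nat) : ∀ (f2 n : Nat), n < f1 → n < f2 →
    Nat.toDigitsCore 10 f1 n [] = Nat.toDigitsCore 10 f2 n [] := by
  induction f1 with
  | zero => omega
  | succ g ih =>
    intro f2 n h1 h2
    obtain ⟨g2, rfl⟩ : ∃ g2, f2 = g2 + 1 := ⟨f2 - 1, by omega⟩
    rw [tdc_step, tdc_step]
    by_cases h : n / 10 = 0
    · simp [h]
    · simp only [h, if_false]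
      rw [tdc_tl g, tdc_tl g2, ih g2 (n/10) (by omega) (by omega)]

lemma toDigits_rec (n : Nat) :
    Nat.toDigits 10 n = if n < 10 then [Nat.digitChar n]
      else Nat.toDigits 10 (n / 10) ++ [Nat.digitChar (n % 10)] := by
  rw [Nat.toDigits, tdc_step]
  by_cases h : n < 10
  · simp [Nat.div_eq_of_lt h, h, Nat.mod_eq_of_lt h]
  · have h10 : ¬ (n / 10 = 0) := by omega
    simp only [h10, if_false, h, if_false]
    rw [tdc_tl, Nat.toDigits, tdc_fuel n (n/10 + 1) (n/10) (by omega) (by omega)]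

lemma digitChar_facts : ∀ k, k < 10 →
    ('0' ≤ Nat.digitChar k ∧ Nat.digitChar k ≤ '9') ∧ (Nat.digitChar k).toNat = k + 48 := by
  decide

lemma digitChar_of_char : ∀ c : Char, '0' ≤ c → c ≤ '9' → Nat.digitChar (c.toNat - 48) = c := by
  intro c h1 h2
  have hb : 48 ≤ c.toNat ∧ c.toNat ≤ 57 := by
    constructor <;> simpa [Char.le_def] using (by assumption : _)
  have key : ∀ k, k < 58 → 48 ≤ k → Nat.digitChar (k - 48) = Char.ofNat k := by decide
  have := key c.toNat (by omega) (by omega)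
  rwa [Char.ofNat_toNat] at this

lemma digits_spec (n : Nat) :
    Nat.toDigits 10 n ≠ [] ∧ (∀ c ∈ Nat.toDigits 10 n, '0' ≤ c ∧ c ≤ '9') ∧
      (n ≠ 0 → (Nat.toDigits 10 n).head? ≠ some '0') := by
  induction n using Nat.strong_induction_on with
  | _ n ih =>
    rw [toDigits_rec]
    by_cases h : n < 10
    · have := digitChar_facts n h
      simp only [h, if_true]
      refine ⟨by simp, by simpa using this.1, ?_⟩
      intro hn
      simp only [List.head?_cons, ne_eq, Option.some.injEq]
      intro hc
      have := this.2
      rw [hc] at this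
      simp [Char.toNat] at this; omega
    · have ihh := ih (n / 10) (by omega)
      simp only [h, if_false]
      have hd := digitChar_facts (n % 10) (by omega)
      refine ⟨by simp [ihh.1], ?_, ?_⟩
      · intro c hc
        rcases List.mem_append.mp hc with h' | h'
        · exact ihh.2.1 c h'
        · simp at h'; subst h'; exact hd.1
      · intro _
        obtain ⟨c, t, hct⟩ := List.exists_cons_of_ne_nil ihh.1
        rw [hct]
        have := ihh.2.2 (by omega)
        rw [hct] at this
        simpa using this

lemma scan_append (xs : List Char) : ∀ (ys : List Char) (a : Int),
    pvScanB (xs ++ ys) a = (pvScanB xs a).bind (fun m => pvScanB ys m) := by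
  induction xs with
  | nil => intro ys a; simp [pvScanB]
  | cons c cs ih =>
    intro ys a
    simp only [List.cons_append, pvScanB]
    by_cases h : '0' ≤ c ∧ c ≤ '9' <;> simp [h, ih]

lemma scan_digits (n : Nat) : pvScanB (Nat.toDigits 10 n) 0 = some (n : Int) := by
  induction n using Nat.strong_induction_on with
  | _ n ih =>
    rw [toDigits_rec]
    by_cases h : n < 10
    · have hd := digitChar_facts n h
      rw [if_pos h]
      simp only [pvScanB, if_pos hd.1]
      have h2 := hd.2
      congr 1
      omega
    · have hd := digitChar_facts (n % 10) (by omega)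
      rw [if_neg h, scan_append, ih (n / 10) (by omega)]
      simp only [Option.bind_some, pvScanB, if_pos hd.1]
      have h2 := hd.2
      congr 1
      omega

lemma scan_ge (cs : List Char) : ∀ (a m : Int), 0 ≤ a → pvScanB cs a = some m → a ≤ m := by
  induction cs with
  | nil => intro a m _ h; simp [pvScanB] at h; omega
  | cons c t ih =>
    intro a m ha h
    simp only [pvScanB] at h
    by_cases hc : '0' ≤ c ∧ c ≤ '9'
    · rw [if_pos hc] at h
      have h48 : (48 : Int) ≤ c.toNat := by
        have := hc.1; simp [Char.le_def] at this; exact_mod_cast this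
      have := ih (a * 10 + ((c.toNat : Int) - 48)) m (by omega) h
      omega
    · rw [if_neg hc] at h; exact absurd h (by simp)

lemma scan_canon (cs : List Char) : ∀ (i : Int), cs ≠ [] → cs.head? ≠ some '0' →
    pvScanB cs 0 = some i → cs = Nat.toDigits 10 i.toNat := by
  induction cs using List.reverseRecOn with
  | nil => intro i h; exact absurd rfl h
  | append_singleton xs x ih =>
    intro i _ hhd hscan
    by_cases hxs : xs = []
    · subst hxs
      simp only [List.nil_append, pvScanB] at hscan
      by_cases hc : '0' ≤ x ∧ x ≤ '9'
      · rw [if_pos hc] at hscan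
        simp only [Option.some.injEq] at hscan
        have h48 : 48 ≤ x.toNat ∧ x.toNat ≤ 57 := by
          constructor
          · have := hc.1; simpa [Char.le_def] using this
          · have := hc.2; simpa [Char.le_def] using this
        have hx0 : x ≠ '0' := by simpa using hhd
        have hx48 : x.toNat ≠ 48 := by
          intro hh; apply hx0
          have : x = Char.ofNat 48 := by rw [← hh, Char.ofNat_toNat]
          rw [this]
        have hi : i = (x.toNat : Int) - 48 := by omega
        have hlt : i.toNat < 10 := by omega
        rw [toDigits_rec, if_pos hlt]
        have hv : i.toNat = x.toNat - 48 := by omega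
        rw [hv, digitChar_of_char x hc.1 hc.2]
        simp
      · rw [if_neg hc] at hscan; exact absurd hscan (by simp)
    · rw [scan_append] at hscan
      obtain ⟨m, hm, hrest⟩ : ∃ m, pvScanB xs 0 = some m ∧ pvScanB [x] m = some i := by
        cases hxsv : pvScanB xs 0 with
        | none => rw [hxsv] at hscan; simp at hscan
        | some m => rw [hxsv] at hscan; simp at hscan; exact ⟨m, rfl, hscan⟩
      have hhd' : xs.head? ≠ some '0' := by
        obtain ⟨c, t, rfl⟩ := List.exists_cons_of_ne_nil hxs
        simpa using hhd
      have ihx := ih m hxs hhd' hm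
      have hm1 : 1 ≤ m := by
        obtain ⟨c, t, rfl⟩ := List.exists_cons_of_ne_nil hxs
        simp only [pvScanB] at hm
        by_cases hc : '0' ≤ c ∧ c ≤ '9'
        · rw [if_pos hc] at hm
          have h48 : 48 ≤ c.toNat := by
            have := hc.1; simpa [Char.le_def] using this
          have hc0 : c ≠ '0' := by simpa using hhd'
          have hc48 : c.toNat ≠ 48 := by
            intro hh; apply hc0
            have : c = Char.ofNat 48 := by rw [← hh, Char.ofNat_toNat]
            rw [this]
          have := scan_ge t (0 * 10 + ((c.toNat : Int) - 48)) m (by omega) hm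
          omega
        · rw [if_neg hc] at hm; exact absurd hm (by simp)
      simp only [pvScanB] at hrest
      by_cases hc : '0' ≤ x ∧ x ≤ '9'
      · rw [if_pos hc] at hrest
        simp only [Option.some.injEq] at hrest
        have h48 : 48 ≤ x.toNat ∧ x.toNat ≤ 57 := by
          constructor
          · have := hc.1; simpa [Char.le_def] using this
          · have := hc.2; simpa [Char.le_def] using this
        have hi : i = m * 10 + ((x.toNat : Int) - 48) := by omega
        have hge : 10 ≤ i.toNat := by omega
        rw [toDigits_rec, if_neg (by omega)]
        have hdiv : i.toNat / 10 = m.toNat := by omega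
        have hmod : i.toNat % 10 = x.toNat - 48 := by omega
        rw [hdiv, hmod, ← ihx, digitChar_of_char x hc.1 hc.2]
      · rw [if_neg hc] at hrest; exact absurd hrest (by simp)

-- toChars of a positive integer is Nat.toDigits 10 of its toNat
lemma toChars_pos (i : Int) (hi : 1 ≤ i) :
    PySem.Int.toChars i = Nat.toDigits 10 i.toNat := by
  rw [PySem.Int.toChars, if_neg (by omega)]

-- the candidate string, on the character-list side
lemma cand_toList (i : Int) :
    ("Location " ++ PySem.Int.toStr i).toList = "Location ".toList ++ PySem.Int.toChars i := by
  rw [String.toList_append, PySem.Int.toList_toStr]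

-- pvParseB recognises exactly the canonical candidate strings
lemma parse_iff (s : String) (i : Int) (hi : 1 ≤ i) :
    pvParseB s = some i ↔ s = "Location " ++ PySem.Int.toStr i := by
  constructor
  · intro h
    rw [pvParseB] at h
    by_cases hsw : PySem.Str.startswith s "Location "
    · rw [if_pos hsw] at h
      have hpre : "Location ".toList <+: s.toList := by
        rw [PySem.Str.startswith_eq] at hsw
        exact (PySem.Chars.startswith_iff _ _).mp hsw
      obtain ⟨rest, hs⟩ := hpre
      have hrest : (PySem.Str.slice s (some 9) none).toList = rest := by
        rw [PySem.Str.toList_slice, PySem.Chars.slice_eq_listSlice]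
        have h9 : (9 : Int) = ((9 : Nat) : Int) := by norm_cast
        rw [h9, PySem.List.slice_from_natCast, ← hs]
        have : ("Location ".toList).length = 9 := by decide
        rw [← this, List.drop_left]
      rw [hrest, pvRestB] at h
      by_cases hnil : rest.isEmpty
      · rw [if_pos hnil] at h; exact absurd h (by simp)
      · rw [if_neg hnil] at h
        by_cases hc0 : rest.head? = some '0'
        · rw [if_pos hc0] at h; exact absurd h (by simp)
        · rw [if_neg hc0] at h
          have hcanon := scan_canon rest i (by simpa [List.isEmpty_iff] using hnil) hc0 h
          apply String.toList_inj.mp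
          rw [cand_toList, ← hs, hcanon, toChars_pos i hi]
    · rw [if_neg hsw] at h; exact absurd h (by simp)
  · intro h
    subst h
    have hlist := cand_toList i
    have hsw : PySem.Str.startswith ("Location " ++ PySem.Int.toStr i) "Location " = true := by
      rw [PySem.Str.startswith_eq, PySem.Chars.startswith_iff, hlist]
      exact ⟨PySem.Int.toChars i, rfl⟩
    have hrest : (PySem.Str.slice ("Location " ++ PySem.Int.toStr i) (some 9) none).toList
        = PySem.Int.toChars i := by
      rw [PySem.Str.toList_slice, PySem.Chars.slice_eq_listSlice]
      have h9 : (9 : Int) = ((9 : Nat) : Int) := by norm_cast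
      rw [h9, PySem.List.slice_from_natCast, hlist]
      have : ("Location ".toList).length = 9 := by decide
      rw [← this, List.drop_left]
    rw [pvParseB, if_pos hsw, hrest, toChars_pos i hi, pvRestB]
    have hds := digits_spec i.toNat
    rw [if_neg (by simpa [List.isEmpty_iff] using hds.1),
        if_neg (hds.2.2 (by omega)), scan_digits]
    have hti : ((i.toNat : Int)) = i := by omega
    rw [hti]

-- the index list B folds up: membership characterisation
lemma mem_foldl_parse (locs : List (List (String × String))) : ∀ (acc : List Int) (x : Int),
    (x ∈ locs.foldl (fun acc loc =>
        match pvParseB (pvNameA loc) with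
        | some n => acc ++ [n]
        | none => acc) acc)
      ↔ x ∈ acc ∨ ∃ loc ∈ locs, pvParseB (pvNameA loc) = some x := by
  induction locs with
  | nil => intro acc x; simp
  | cons l ls ih =>
    intro acc x
    simp only [List.foldl_cons]
    cases hp : pvParseB (pvNameA l) with
    | none => rw [ih]; simp [hp]
    | some n =>
      rw [ih]
      simp only [List.mem_append, List.mem_cons, List.not_mem_nil, or_false]
      constructor
      · rintro ((h | rfl) | ⟨loc, hmem, hpp⟩)
        · exact Or.inl h
        · exact Or.inr ⟨l, Or.inl rfl, hp⟩
        · exact Or.inr ⟨loc, Or.inr hmem, hpp⟩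
      · rintro (h | ⟨loc, (rfl | hmem), hpp⟩)
        · exact Or.inl (Or.inl h)
        · rw [hp] at hpp; exact Or.inl (Or.inr (Option.some.inj hpp).symm)
        · exact Or.inr ⟨loc, hmem, hpp⟩

-- the folded index list is no longer than the location list
lemma length_foldl_parse (locs : List (List (String × String))) : ∀ (acc : List Int),
    (locs.foldl (fun acc loc =>
        match pvParseB (pvNameA loc) with
        | some n => acc ++ [n]
        | none => acc) acc).length ≤ acc.length + locs.length := by
  induction locs with
  | nil => intro acc; simp
  | cons l ls ih =>
    intro acc
    simp only [List.foldl_cons, List.length_cons]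
    cases hp : pvParseB (pvNameA l) with
    | none =>
      have := ih acc
      calc (List.foldl (fun acc loc =>
              match pvParseB (pvNameA loc) with
              | some n => acc ++ [n]
              | none => acc) acc ls).length ≤ acc.length + ls.length := this
        _ ≤ acc.length + (ls.length + 1) := by omega
    | some n =>
      have := ih (acc ++ [n])
      calc (List.foldl (fun acc loc =>
              match pvParseB (pvNameA loc) with
              | some n => acc ++ [n]
              | none => acc) (acc ++ [n]) ls).length
            ≤ (acc ++ [n]).length + ls.length := this
        _ ≤ acc.length + (ls.length + 1) := by simp; omega

-- the integer probe loop that mirrors A's string probe loop (proof-side helper)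
def pvLoopB (used : List Int) : Nat → Int → Int
  | 0, i => i
  | fuel+1, i => if used.contains i then pvLoopB used fuel (i + 1) else i

-- A's candidate test and the integer membership test agree at every index ≥ 1
lemma mem_agree (locs : List (List (String × String))) (i : Int) (hi : 1 ≤ i) :
    (("Location " ++ PySem.Int.toStr i) ∈ PySem.Set.ofList (locs.map (fun loc => pvNameA loc)))
      ↔ i ∈ locs.foldl (fun acc loc =>
          match pvParseB (pvNameA loc) with
          | some n => acc ++ [n]
          | none => acc) [] := by
  rw [PySem.Set.mem_ofList, mem_foldl_parse, List.mem_map]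
  simp only [List.not_mem_nil, false_or]
  constructor
  · rintro ⟨loc, hmem, hname⟩
    exact ⟨loc, hmem, (parse_iff (pvNameA loc) i hi).mpr hname⟩
  · rintro ⟨loc, hmem, hp⟩
    exact ⟨loc, hmem, (parse_iff (pvNameA loc) i hi).mp hp⟩

-- A's loop and the integer probe loop run in lockstep
lemma loop_lockstep (used : List String) (usedI : List Int)
    (H : ∀ i : Int, 1 ≤ i → (("Location " ++ PySem.Int.toStr i) ∈ used ↔ i ∈ usedI)) :
    ∀ (fuel : Nat) (i : Int), 1 ≤ i →
      pvLoopA used fuel i = "Location " ++ PySem.Int.toStr (pvLoopB usedI fuel i) := by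
  intro fuel
  induction fuel with
  | zero => intro i _; rfl
  | succ f ih =>
    intro i hi
    rw [pvLoopA, pvLoopB]
    by_cases hmem : i ∈ usedI
    · have hA : ("Location " ++ PySem.Int.toStr i) ∈ used := (H i hi).mpr hmem
      rw [if_neg (by simp [hA]),
          if_pos (by simp [hmem])]
      exact ih (i + 1) (by omega)
    · have hA : ("Location " ++ PySem.Int.toStr i) ∉ used := fun hh => hmem ((H i hi).mp hh)
      simp [hA, hmem]

-- B's gap scan over a sorted list returns the least index ≥ i outside the list
lemma gap_spec (s : List Int) (hs : s.Pairwise (· ≤ ·)) : ∀ i : Int,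
    i ≤ pvGapScan s i ∧ pvGapScan s i ∉ s ∧
      ∀ j : Int, i ≤ j → j < pvGapScan s i → j ∈ s := by
  induction s with
  | nil => intro i; simp [pvGapScan]
  | cons v vs ih =>
    have hv : ∀ y ∈ vs, v ≤ y := (List.pairwise_cons.mp hs).1
    have ihs := ih (List.pairwise_cons.mp hs).2
    intro i
    rw [pvGapScan]
    by_cases h1 : v = i
    · rw [if_pos h1]
      obtain ⟨g1, g2, g3⟩ := ihs (i + 1)
      refine ⟨by omega, ?_, ?_⟩
      · simp only [List.mem_cons, not_or]
        exact ⟨by omega, g2⟩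
      · intro j hj1 hj2
        by_cases hji : j = i
        · simp [hji, h1.symm]
        · exact List.mem_cons_of_mem v (g3 j (by omega) hj2)
    · rw [if_neg h1]
      by_cases h2 : v > i
      · rw [if_pos h2]
        refine ⟨le_refl i, ?_, by omega⟩
        simp only [List.mem_cons, not_or]
        exact ⟨by omega, fun hm => by have := hv i hm; omega⟩
      · rw [if_neg h2]
        obtain ⟨g1, g2, g3⟩ := ihs i
        refine ⟨g1, ?_, fun j hj1 hj2 => List.mem_cons_of_mem v (g3 j hj1 hj2)⟩
        simp only [List.mem_cons, not_or]
        exact ⟨by omega, g2⟩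

-- the integer probe loop: either the fuel window is all used, or it returns the least free index
lemma probe_spec (used : List Int) : ∀ (fuel : Nat) (i : Int),
    (∀ j : Int, i ≤ j → j < i + fuel → j ∈ used) ∨
      (i ≤ pvLoopB used fuel i ∧ pvLoopB used fuel i ∉ used ∧
        ∀ j : Int, i ≤ j → j < pvLoopB used fuel i → j ∈ used) := by
  intro fuel
  induction fuel with
  | zero => intro i; left; intro j h1 h2; omega
  | succ f ih =>
    intro i
    rw [pvLoopB]
    by_cases hmem : i ∈ used
    · rw [if_pos (List.contains_iff_mem.mpr hmem)]
      rcases ih (i + 1) with h | ⟨h1, h2, h3⟩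
      · left
        intro j hj1 hj2
        by_cases hji : j = i
        · exact hji ▸ hmem
        · exact h j (by omega) (by omega)
      · right
        refine ⟨by omega, h2, ?_⟩
        intro j hj1 hj2
        by_cases hji : j = i
        · exact hji ▸ hmem
        · exact h3 j (by omega) hj2
    · rw [if_neg (by rw [List.contains_iff_mem]; exact hmem)]
      right
      exact ⟨le_refl i, hmem, by omega⟩

-- pigeonhole: a window of |used|+1 consecutive integers cannot all lie in used
lemma no_full_window (used : List Int) (i : Int) :
    ¬ ∀ j : Int, i ≤ j → j < i + (used.length + 1 : Nat) → j ∈ used := by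
  intro h
  have hinj : Function.Injective (fun k : Nat => i + (k : Int)) := by
    intro a b hab; simp only at hab; omega
  have hsub : (Finset.range (used.length + 1)).image (fun k : Nat => i + (k : Int))
      ⊆ used.toFinset := by
    intro x hx
    simp only [Finset.mem_image, Finset.mem_range] at hx
    obtain ⟨k, hk, rfl⟩ := hx
    exact List.mem_toFinset.mpr (h _ (by omega) (by push_cast; omega))
  have hcard := Finset.card_le_card hsub
  rw [Finset.card_image_of_injective _ hinj, Finset.card_range] at hcard
  have := List.toFinset_card_le used
  omega

-- with sufficient fuel, the probe loop equals B's gap scan over the sorted indices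
lemma probe_eq_gap (idxs : List Int) (fuel : Nat) (hf : idxs.length + 1 ≤ fuel) :
    pvLoopB idxs fuel 1 = pvGapScan (PySem.List.sorted idxs (fun x : Int => x) false) 1 := by
  have hmem : ∀ x : Int, x ∈ PySem.List.sorted idxs (fun x : Int => x) false ↔ x ∈ idxs :=
    fun x => PySem.List.mem_sorted idxs (fun x : Int => x) false x
  have hpw : (PySem.List.sorted idxs (fun x : Int => x) false).Pairwise (· ≤ ·) :=
    PySem.List.sorted_pairwise idxs (fun x : Int => x)
  obtain ⟨g1, g2, g3⟩ := gap_spec _ hpw 1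
  rcases probe_spec idxs fuel 1 with h | ⟨p1, p2, p3⟩
  · exact absurd (fun j h1 h2 => h j h1 (by push_cast at h2 ⊢; omega)) (no_full_window idxs 1)
  · rcases lt_trichotomy (pvLoopB idxs fuel 1)
      (pvGapScan (PySem.List.sorted idxs (fun x : Int => x) false) 1) with hlt | heq | hgt
    · exact absurd ((hmem _).mp (g3 _ p1 hlt)) p2
    · exact heq
    · exact absurd ((hmem _).mpr (p3 _ g1 hgt)) g2

-- ===== VERDICT (by name: the statement is the Claim_ definition above) =====
set_option maxHeartbeats 1000000 in
theorem next_saved_location_name_py_spec : Claim_equal_next_saved_location_name_py := by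
  intro locations _
  show next_saved_location_name_py locations = next_saved_location_name_py_alt locations
  unfold next_saved_location_name_py next_saved_location_name_py_alt
  dsimp only
  have hlen := length_foldl_parse (locations.getD []) []
  simp only [List.length_nil, Nat.zero_add] at hlen
  rw [loop_lockstep _ _ (fun i hi => mem_agree (locations.getD []) i hi)
        ((locations.getD []).length + 1) 1 (by omega),
      probe_eq_gap _ _ (by omega)]
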